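-- pv_equiv track=rewrite | github.com/KimSieber/AdventOfCode | 2024/#03 Mull It Over.py | get_result_of_multiplications
-- ===== SOURCE A (Python) =====
-- def get_result_of_multiplications(corrupt_code):
--     result = 0
--     next_mul_pos = -1
--     while True:
--         next_mul_pos = corrupt_code.find("mul(", next_mul_pos + 1)
--         if next_mul_pos == -1: break
--         next_bracket = corrupt_code.find(")", next_mul_pos)
--         if next_bracket == -1: break
--
--         if corrupt_code[next_mul_pos++4:next_bracket].find(" ") > 0:  continue
--
--         number_list = corrupt_code[next_mul_pos++4:next_bracket].split(",")
--         if len(number_list) != 2: continue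
--
--         if not number_list[0].isdigit() or not number_list[1].isdigit(): continue
--
--         result += int(number_list[0]) * int(number_list[1])
--     return result
-- ===== SOURCE B (Python) =====
-- def get_result_of_multiplications(corrupt_code):
--     total = 0
--     for segment in corrupt_code.split("mul(")[1:]:
--         j = segment.find(")")
--         if j == -1:
--             continue
--         parts = segment[:j].split(",")
--         if len(parts) == 2 and parts[0].isdigit() and parts[1].isdigit():
--             total += int(parts[0]) * int(parts[1])
--     return total
-- ===== Notes on version B (the rewrite author's own statement) =====
-- stated objective: alternative
-- what changed: B splits the input once on the four-character mul-opener and validates each resulting segment (prefix up to the first closing parenthesis, comma-split into exactly two digit parts), replacing A's index-driven while-loop of repeated find calls; A's redundant leading-space check is dropped since any space makes a part fail the digit test.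
import Mathlib
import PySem

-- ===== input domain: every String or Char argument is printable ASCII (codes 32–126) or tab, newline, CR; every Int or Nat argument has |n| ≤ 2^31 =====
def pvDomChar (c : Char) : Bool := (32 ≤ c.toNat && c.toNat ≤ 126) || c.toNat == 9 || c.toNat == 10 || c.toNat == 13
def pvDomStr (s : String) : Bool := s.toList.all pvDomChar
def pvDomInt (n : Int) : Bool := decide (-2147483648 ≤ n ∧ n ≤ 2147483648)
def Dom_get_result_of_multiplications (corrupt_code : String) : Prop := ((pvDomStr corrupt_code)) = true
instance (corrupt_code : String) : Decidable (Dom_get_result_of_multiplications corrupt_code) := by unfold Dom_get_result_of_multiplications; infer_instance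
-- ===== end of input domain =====

-- B replaces A's index-driven while-loop (repeated str.find from the last hit) by one split on the
-- literal "mul(" and a per-segment validation; same return value, a different decomposition ("alternative").

-- ===== PORT A =====
-- literal port of A's while-loop: pos is next_mul_pos, fuel = length+1 is a termination guard only
-- (each iteration strictly increases pos, so the fuel is never exhausted).
def pvLoopA (s : List Char) : Nat → Int → Int → Int
  | 0, _, acc => acc
  | fuel+1, pos, acc =>
    let p := PySem.Chars.findFrom s ['m','u','l','('] (pos + 1) none
    if p = -1 then acc else
    let b := PySem.Chars.findFrom s [')'] p none
    if b = -1 then acc else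
    let content := PySem.List.slice s (some (p + 4)) (some b)
    if 0 < PySem.Chars.find content [' '] then pvLoopA s fuel p acc else
    let nl := PySem.Chars.splitOn content [',']
    if nl.length ≠ 2 then pvLoopA s fuel p acc else
    if (!PySem.Chars.strIsdigit (nl.getD 0 []) || !PySem.Chars.strIsdigit (nl.getD 1 [])) then pvLoopA s fuel p acc
    else pvLoopA s fuel p
      (acc + (PySem.Int.ofChars? (nl.getD 0 [])).getD 0 * (PySem.Int.ofChars? (nl.getD 1 [])).getD 0)

def get_result_of_multiplications (corrupt_code : String) : Int :=
  pvLoopA corrupt_code.toList (corrupt_code.toList.length + 1) (-1) 0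

-- ===== PORT B =====
-- loop body of Source B: value contributed by one segment (text after one occurrence of "mul(")
def pvSegVal (seg : List Char) : Int :=
  let j := PySem.Chars.find seg [')']
  if j = -1 then 0 else
  let parts := PySem.Chars.splitOn (PySem.Chars.slice seg none (some j)) [',']
  if (parts.length == 2 && PySem.Chars.strIsdigit (parts.getD 0 [])
        && PySem.Chars.strIsdigit (parts.getD 1 [])) then
    (PySem.Int.ofChars? (parts.getD 0 [])).getD 0 * (PySem.Int.ofChars? (parts.getD 1 [])).getD 0
  else 0

def get_result_of_multiplications_alt (corrupt_code : String) : Int :=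
  (PySem.List.slice (PySem.Chars.splitOn corrupt_code.toList ['m','u','l','(']) (some 1) none).foldl
    (fun acc seg => acc + pvSegVal seg) 0

-- ===== PRECONDITION & SPEC =====
def Spec_get_result_of_multiplications (corrupt_code : String) (out : Int) : Prop := out = get_result_of_multiplications_alt corrupt_code
instance (corrupt_code : String) (out : Int) : Decidable (Spec_get_result_of_multiplications corrupt_code out) := by unfold Spec_get_result_of_multiplications; infer_instance

-- ===== CLAIM (what is proved, stated in full; the proofs are below) =====
def Claim_equal_get_result_of_multiplications : Prop := ∀ (corrupt_code : String), Dom_get_result_of_multiplications corrupt_code → Spec_get_result_of_multiplications corrupt_code (get_result_of_multiplications corrupt_code)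

-- ===== LEMMAS AND PROOFS =====

-- the pattern "mul(" as a list of chars
def pvM : List Char := ['m','u','l','(']

-- ---------- find.go basics ----------
lemma pv_go_ge (sub l : List Char) (k : Nat) :
    PySem.Chars.find.go sub l k = -1 ∨ (k : Int) ≤ PySem.Chars.find.go sub l k := by
  induction l generalizing k with
  | nil =>
    rw [PySem.Chars.find.go]
    by_cases hs : sub.isEmpty <;> simp [hs]
  | cons c t ih =>
    rw [PySem.Chars.find.go]
    by_cases hp : sub.isPrefixOf (c :: t)
    · simp [hp]
    · simp only [hp, if_false]
      rcases ih (k + 1) with h | h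
      · exact Or.inl h
      · right; push_cast at h ⊢; omega

lemma pv_go_shift (sub l : List Char) (k : Nat) :
    PySem.Chars.find.go sub l k =
      if PySem.Chars.find.go sub l 0 = -1 then -1 else PySem.Chars.find.go sub l 0 + k := by
  induction l generalizing k with
  | nil =>
    rw [PySem.Chars.find.go, PySem.Chars.find.go]
    by_cases hs : sub.isEmpty <;> simp [hs]
  | cons c t ih =>
    rw [PySem.Chars.find.go]
    conv_rhs => rw [PySem.Chars.find.go]
    by_cases hp : sub.isPrefixOf (c :: t)
    · simp [hp]
    · simp only [hp, if_false]
      rw [ih (k + 1), ih 1]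
      rcases pv_go_ge sub t 0 with h | h
      · simp [h]
      · by_cases h0 : PySem.Chars.find.go sub t 0 = -1
        · simp [h0]
        · simp only [h0, if_false]
          split <;> push_cast at h ⊢ <;> omega

lemma pv_find_cons (c : Char) (l sub : List Char) :
    PySem.Chars.find (c :: l) sub =
      if sub.isPrefixOf (c :: l) then 0
      else if PySem.Chars.find l sub = -1 then -1 else PySem.Chars.find l sub + 1 := by
  show PySem.Chars.find.go sub (c :: l) 0 = _
  rw [PySem.Chars.find.go]
  by_cases hp : sub.isPrefixOf (c :: l)
  · simp [hp]
  · simp only [hp, if_false]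
    rw [pv_go_shift sub l 1]
    rfl

-- ---------- singleton patterns and getElem? ----------
lemma pv_single_prefix (t : List Char) (x : Char) : [x] <+: t ↔ t.head? = some x := by
  cases t with
  | nil => simp
  | cons c r => simp [List.cons_prefix_cons, eq_comm]

lemma pv_single_prefix_drop (l : List Char) (i : Nat) (x : Char) :
    [x] <+: l.drop i ↔ l[i]? = some x := by
  rw [pv_single_prefix, List.head?_drop]

lemma pv_find_nil (sub : List Char) :
    PySem.Chars.find [] sub = if sub.isEmpty then 0 else -1 := by
  show PySem.Chars.find.go sub [] 0 = _
  rw [PySem.Chars.find.go]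
  rfl

lemma pv_find_single_spec (l : List Char) (x : Char) (h : PySem.Chars.find l [x] ≠ -1) :
    l[(PySem.Chars.find l [x]).toNat]? = some x ∧
      ∀ i < (PySem.Chars.find l [x]).toNat, l[i]? ≠ some x := by
  have h0 : 0 ≤ PySem.Chars.find l [x] := by
    have := PySem.Chars.neg_one_le_find l [x]
    omega
  obtain ⟨h1, h2⟩ := PySem.Chars.find_spec h0
  refine ⟨(pv_single_prefix_drop _ _ _).1 h1, fun i hi hm => ?_⟩
  exact h2 i hi ((pv_single_prefix_drop _ _ _).2 hm)

lemma pv_find_single_eq (l : List Char) (x : Char) (j : Nat)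
    (hj : l[j]? = some x) (hmin : ∀ i < j, l[i]? ≠ some x) :
    PySem.Chars.find l [x] = j := by
  have hinf : [x] <:+: l :=
    (PySem.Chars.isIn_iff_infix _ _).1
      ((PySem.Chars.exists_prefix_drop_iff_isIn _ _).1 ⟨j, (pv_single_prefix_drop _ _ _).2 hj⟩)
  have hne : PySem.Chars.find l [x] ≠ -1 := (PySem.Chars.find_ne_neg_one_iff _ _).2 hinf
  have h0 : 0 ≤ PySem.Chars.find l [x] := by
    have := PySem.Chars.neg_one_le_find l [x]
    omega
  obtain ⟨h1, h2⟩ := pv_find_single_spec l x hne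
  rcases Nat.lt_trichotomy (PySem.Chars.find l [x]).toNat j with hlt | heq | hgt
  · exact absurd h1 (hmin _ hlt)
  · omega
  · exact absurd hj (h2 j hgt)

lemma pv_find_single_neg (l : List Char) (x : Char) (h : x ∉ l) :
    PySem.Chars.find l [x] = -1 := by
  refine (PySem.Chars.find_eq_neg_one_iff _ _).2 fun hinf => ?_
  exact h (hinf.subset (by simp))

-- ---------- pieces: the splitting of a string at the occurrences of sep ----------
def pvPieces (sep : List Char) (l : List Char) : List (List Char) :=
  match l with
  | [] => [[]]
  | c :: rest =>
    if h : sep.isPrefixOf (c :: rest) ∧ sep ≠ [] then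
      [] :: pvPieces sep ((c :: rest).drop sep.length)
    else
      (pvPieces sep rest).modifyHead (c :: ·)
termination_by l.length
decreasing_by
  · have h1 : 1 ≤ sep.length := by
      cases sep with
      | nil => exact absurd rfl h.2
      | cons a t => simp
    simp only [List.length_drop, List.length_cons]
    omega
  · simp

lemma pv_pieces_ne_nil (sep l : List Char) : pvPieces sep l ≠ [] := by
  fun_induction pvPieces sep l with
  | case1 => simp
  | case2 c rest h ih => simp
  | case3 c rest h ih =>
    cases hq : pvPieces sep rest with
    | nil => exact absurd hq ih
    | cons a t => simp [hq, List.modifyHead]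

lemma pv_go_pieces (sep : List Char) (hsep : sep ≠ []) :
    ∀ (fuel : Nat) (l cur : List Char) (accs : List (List Char)), l.length < fuel →
      PySem.Chars.splitOn.go sep fuel l cur accs =
        accs.reverse ++ (pvPieces sep l).modifyHead (cur.reverse ++ ·) := by
  intro fuel
  induction fuel with
  | zero => intro l cur accs h; omega
  | succ fuel ih =>
    intro l cur accs h
    cases l with
    | nil =>
      rw [PySem.Chars.splitOn.go]
      · simp [pvPieces]
      · omega
    | cons c rest =>
      rw [PySem.Chars.splitOn.go]
      by_cases hp : sep.isPrefixOf (c :: rest)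
      · have h1 : 1 ≤ sep.length := by
          cases sep with
          | nil => exact absurd rfl hsep
          | cons a t => simp
        simp only [hp, if_true]
        rw [ih ((c :: rest).drop sep.length) [] (cur.reverse :: accs)
          (by simp only [List.length_cons] at h; simp only [List.length_drop, List.length_cons]; omega)]
        rw [pvPieces]
        simp only [hp, hsep, ne_eq, not_false_iff, and_self, dif_pos]
        cases hq : pvPieces sep ((c :: rest).drop sep.length) with
        | nil => exact absurd hq (pv_pieces_ne_nil sep _)
        | cons a t => simp [List.modifyHead]
      · simp only [hp, if_false]
        rw [ih rest (c :: cur) accs (by simp at h ⊢; omega)]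
        rw [pvPieces]
        simp only [hp, false_and, dif_neg, not_false_iff]
        cases hq : pvPieces sep rest with
        | nil => simp [List.modifyHead]
        | cons a t => simp [List.modifyHead]

lemma pv_splitOn_eq_pieces (l sep : List Char) (hsep : sep ≠ []) :
    PySem.Chars.splitOn l sep = pvPieces sep l := by
  show PySem.Chars.splitOn.go sep (l.length + 1) l [] [] = _
  rw [pv_go_pieces sep hsep (l.length + 1) l [] [] (by omega)]
  cases hq : pvPieces sep l with
  | nil => exact absurd hq (pv_pieces_ne_nil sep l)
  | cons a t => simp [List.modifyHead]

lemma pv_pieces_no_occ (sep l : List Char) (hsep : sep ≠ [])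
    (h : PySem.Chars.find l sep = -1) : pvPieces sep l = [l] := by
  fun_induction pvPieces sep l with
  | case1 => rfl
  | case2 c rest hpre ih =>
    rw [pv_find_cons, if_pos hpre.1] at h
    exact absurd h (by norm_num)
  | case3 c rest hpre ih =>
    have hnp : ¬ sep.isPrefixOf (c :: rest) := fun hp => hpre ⟨hp, hsep⟩
    rw [pv_find_cons, if_neg hnp] at h
    have hrest : PySem.Chars.find rest sep = -1 := by
      by_cases h1 : PySem.Chars.find rest sep = -1
      · exact h1
      · rw [if_neg h1] at h
        have := PySem.Chars.neg_one_le_find rest sep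
        omega
    rw [ih hrest]
    rfl

lemma pv_pieces_occ (sep l : List Char) (hsep : sep ≠ [])
    (h : PySem.Chars.find l sep ≠ -1) :
    pvPieces sep l = l.take (PySem.Chars.find l sep).toNat ::
      pvPieces sep (l.drop ((PySem.Chars.find l sep).toNat + sep.length)) := by
  fun_induction pvPieces sep l with
  | case1 =>
    rw [pv_find_nil, if_neg (by simpa using hsep)] at h
    exact absurd rfl h
  | case2 c rest hpre ih =>
    rw [pv_find_cons, if_pos hpre.1]
    simp
  | case3 c rest hpre ih =>
    have hnp : ¬ sep.isPrefixOf (c :: rest) := fun hp => hpre ⟨hp, hsep⟩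
    have hne : PySem.Chars.find rest sep ≠ -1 := by
      intro h1
      rw [pv_find_cons, if_neg hnp, if_pos h1] at h
      exact h rfl
    have h0 : 0 ≤ PySem.Chars.find rest sep := by
      have := PySem.Chars.neg_one_le_find rest sep
      omega
    rw [ih hne]
    rw [pv_find_cons, if_neg hnp, if_neg hne]
    have ht : (PySem.Chars.find rest sep + 1).toNat = (PySem.Chars.find rest sep).toNat + 1 := by
      omega
    rw [ht]
    simp only [List.modifyHead, List.take_succ_cons]
    congr 1
    rw [show (PySem.Chars.find rest sep).toNat + 1 + sep.length =
          ((PySem.Chars.find rest sep).toNat + sep.length) + 1 from by omega,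
      List.drop_succ_cons]

lemma pv_pieces_mem (sep l : List Char) (x : Char) (hx : x ∈ l) (hxs : x ∉ sep) :
    ∃ piece ∈ pvPieces sep l, x ∈ piece := by
  fun_induction pvPieces sep l with
  | case1 => simp at hx
  | case2 c rest hpre ih =>
    obtain ⟨t, ht⟩ := List.isPrefixOf_iff_prefix.mp hpre.1
    have hx' : x ∈ (c :: rest).drop sep.length := by
      rw [← ht, List.drop_left]
      rw [← ht] at hx
      rcases List.mem_append.1 hx with h1 | h1
      · exact absurd h1 hxs
      · exact h1
    obtain ⟨piece, hp1, hp2⟩ := ih hx'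
    exact ⟨piece, List.mem_cons_of_mem _ hp1, hp2⟩
  | case3 c rest hpre ih =>
    cases hq : pvPieces sep rest with
    | nil => exact absurd hq (pv_pieces_ne_nil sep rest)
    | cons a t =>
      rcases List.mem_cons.1 hx with rfl | hx'
      · exact ⟨x :: a, by simp [hq, List.modifyHead], by simp⟩
      · obtain ⟨piece, hp1, hp2⟩ := ih hx'
        rw [hq] at hp1
        rcases List.mem_cons.1 hp1 with rfl | hp1'
        · exact ⟨c :: piece, by simp [hq, List.modifyHead], by simp [hp2]⟩
        · exact ⟨piece, by simp [hq, List.modifyHead, hp1'], hp2⟩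

lemma pv_pieces_sub (sep l : List Char) :
    ∀ piece ∈ pvPieces sep l, ∀ x ∈ piece, x ∈ l := by
  fun_induction pvPieces sep l with
  | case1 => simp
  | case2 c rest hpre ih =>
    intro piece hp x hx
    rcases List.mem_cons.1 hp with rfl | hp'
    · simp at hx
    · exact List.mem_of_mem_drop (ih piece hp' x hx)
  | case3 c rest hpre ih =>
    intro piece hp x hx
    cases hq : pvPieces sep rest with
    | nil => exact absurd hq (pv_pieces_ne_nil sep rest)
    | cons a t =>
      rw [hq] at hp
      simp only [List.modifyHead] at hp
      rcases List.mem_cons.1 hp with rfl | hp'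
      · rcases List.mem_cons.1 hx with rfl | hx'
        · simp
        · exact List.mem_cons_of_mem _ (ih a (by rw [hq]; simp) x hx')
      · exact List.mem_cons_of_mem _ (ih piece (by rw [hq]; simp [hp']) x hx)

-- ---------- the parsing of one content string ----------
def pvParseA (content : List Char) : Int :=
  if 0 < PySem.Chars.find content [' '] then 0 else
  let nl := PySem.Chars.splitOn content [',']
  if nl.length ≠ 2 then 0 else
  if (!PySem.Chars.strIsdigit (nl.getD 0 []) || !PySem.Chars.strIsdigit (nl.getD 1 [])) then 0
  else (PySem.Int.ofChars? (nl.getD 0 [])).getD 0 * (PySem.Int.ofChars? (nl.getD 1 [])).getD 0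

def pvParseB (content : List Char) : Int :=
  let parts := PySem.Chars.splitOn content [',']
  if (parts.length == 2 && PySem.Chars.strIsdigit (parts.getD 0 [])
        && PySem.Chars.strIsdigit (parts.getD 1 [])) then
    (PySem.Int.ofChars? (parts.getD 0 [])).getD 0 * (PySem.Int.ofChars? (parts.getD 1 [])).getD 0
  else 0

lemma pv_parseB_zero (content : List Char) (x : Char) (hx : x ∈ content)
    (hc : x ≠ ',') (hd : PySem.Chars.isdigit x = false) : pvParseB content = 0 := by
  simp only [pvParseB]
  rw [pv_splitOn_eq_pieces content [','] (by simp)]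
  obtain ⟨piece, hp, hxp⟩ := pv_pieces_mem [','] content x hx (by simp [hc])
  have hpd : PySem.Chars.strIsdigit piece = false := by
    have hall : piece.all PySem.Chars.isdigit = false := List.all_eq_false.2 ⟨x, hxp, by simp [hd]⟩
    simp [PySem.Chars.strIsdigit, hall]
  by_cases hlen : (pvPieces [','] content).length = 2
  · obtain ⟨a, b, hab⟩ := List.length_eq_two.1 hlen
    rw [hab] at hp ⊢
    rcases List.mem_cons.1 hp with rfl | hp'
    · simp [hpd]
    · rcases List.mem_cons.1 hp' with rfl | hp''
      · simp [hpd]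
      · simp at hp''
  · simp only [List.getD]
    rw [if_neg]
    simp only [Bool.and_eq_true, beq_iff_eq]
    intro hcon
    exact hlen hcon.1.1

lemma pv_single_infix_of_mem (l : List Char) (x : Char) (h : x ∈ l) : [x] <:+: l := by
  obtain ⟨i, hi, hv⟩ := List.mem_iff_getElem.1 h
  exact ((PySem.Chars.isIn_iff_infix _ _).1
    ((PySem.Chars.exists_prefix_drop_iff_isIn _ _).1
      ⟨i, (pv_single_prefix_drop _ _ _).2 (by simp [List.getElem?_eq_getElem, hi, hv])⟩))

lemma pv_parseA_eq_parseB (content : List Char) : pvParseA content = pvParseB content := by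
  by_cases hsp : 0 < PySem.Chars.find content [' ']
  · rw [pvParseA, if_pos hsp]
    have hsm : ' ' ∈ content := by
      have hne : PySem.Chars.find content [' '] ≠ -1 := by omega
      have hinf := (PySem.Chars.find_ne_neg_one_iff _ _).1 hne
      exact hinf.subset (by simp)
    exact (pv_parseB_zero content ' ' hsm (by decide) (by decide)).symm
  · rw [pvParseA, if_neg hsp]
    simp only [pvParseB]
    by_cases hlen : (PySem.Chars.splitOn content [',']).length = 2
    · obtain ⟨a, b, hab⟩ := List.length_eq_two.1 hlen
      rw [hab]
      by_cases hd0 : PySem.Chars.strIsdigit a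
      · by_cases hd1 : PySem.Chars.strIsdigit b
        · simp [hd0, hd1, List.getD]
        · simp [hd0, hd1, List.getD]
      · simp [hd0, List.getD]
    · simp [hlen]

lemma pv_segVal_eq (seg : List Char) :
    pvSegVal seg = if PySem.Chars.find seg [')'] = -1 then 0
      else pvParseB (seg.take (PySem.Chars.find seg [')']).toNat) := by
  by_cases hj : PySem.Chars.find seg [')'] = -1
  · simp [pvSegVal, hj]
  · have h0 : 0 ≤ PySem.Chars.find seg [')'] := by
      have := PySem.Chars.neg_one_le_find seg [')']
      omega
    rw [pvSegVal, pvParseB]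
    simp only [hj, if_false]
    rw [PySem.Chars.slice_eq_listSlice, PySem.List.slice_to _ h0]

lemma pv_segVal_no_paren (seg : List Char) (h : ')' ∉ seg) : pvSegVal seg = 0 := by
  rw [pvSegVal]
  simp [pv_find_single_neg seg ')' h]

-- ---------- the loop of A as a recursion on suffixes ----------
def pvTailLoop (t : List Char) : Int :=
  if h : PySem.Chars.find t pvM = -1 then 0
  else
    let u := t.drop ((PySem.Chars.find t pvM).toNat + 4)
    if PySem.Chars.find u [')'] = -1 then 0
    else pvParseA (u.take (PySem.Chars.find u [')']).toNat) + pvTailLoop u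
termination_by t.length
decreasing_by
  have h0 : 0 ≤ PySem.Chars.find t pvM := by
    have := PySem.Chars.neg_one_le_find t pvM
    omega
  have hpre := (PySem.Chars.find_spec h0).1
  have hlen := hpre.length_le
  simp only [List.length_drop, pvM, List.length_cons, List.length_nil] at hlen ⊢
  omega

def pvBodyVal (u : List Char) : Int :=
  if PySem.Chars.find u [')'] = -1 then 0
  else pvParseB (u.take (PySem.Chars.find u [')']).toNat) + pvTailLoop u

def pvFullSum (ps : List (List Char)) : Int := (ps.map pvSegVal).sum

lemma pv_tailLoop_eq_body (u : List Char) (h : PySem.Chars.find u pvM ≠ -1) :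
    pvTailLoop u = pvBodyVal (u.drop ((PySem.Chars.find u pvM).toNat + 4)) := by
  rw [pvTailLoop]
  simp only [dif_neg h, pvBodyVal, pv_parseA_eq_parseB]

lemma pv_decomp (s : List Char) (h : PySem.Chars.find s pvM ≠ -1) :
    s.drop (PySem.Chars.find s pvM).toNat =
      'm' :: 'u' :: 'l' :: '(' :: s.drop ((PySem.Chars.find s pvM).toNat + 4) := by
  have h0 : 0 ≤ PySem.Chars.find s pvM := by
    have := PySem.Chars.neg_one_le_find s pvM
    omega
  obtain ⟨r, hr⟩ := (PySem.Chars.find_spec h0).1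
  have hdrop : s.drop ((PySem.Chars.find s pvM).toNat + 4) = r := by
    have h4 : s.drop ((PySem.Chars.find s pvM).toNat + 4)
        = (s.drop (PySem.Chars.find s pvM).toNat).drop 4 := by
      rw [List.drop_drop, Nat.add_comm]
    rw [h4, ← hr]
    rfl
  rw [hdrop, ← hr]
  rfl

lemma pv_fullSum_zero (ps : List (List Char)) (h : ∀ p ∈ ps, pvSegVal p = 0) :
    pvFullSum ps = 0 := by
  simp only [pvFullSum]
  apply List.sum_eq_zero
  intro x hx
  obtain ⟨p, hp, rfl⟩ := List.mem_map.1 hx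
  exact h p hp

lemma pv_main (n : Nat) : ∀ u : List Char, u.length ≤ n →
    pvBodyVal u = pvFullSum (pvPieces pvM u) := by
  induction n with
  | zero =>
    intro u hu
    have : u = [] := List.eq_nil_of_length_eq_zero (by omega)
    subst this
    rw [pvBodyVal, if_pos (by rw [pv_find_nil]; rfl)]
    rw [show pvPieces pvM [] = [[]] from by rw [pvPieces]]
    rw [pv_fullSum_zero _ (by
      intro p hp
      simp only [List.mem_singleton] at hp
      subst hp
      exact pv_segVal_no_paren [] (by simp))]
  | succ n ih =>
    intro u hu
    by_cases hj : PySem.Chars.find u [')'] = -1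
    · rw [pvBodyVal, if_pos hj]
      have hnp : ')' ∉ u := fun hm =>
        ((PySem.Chars.find_ne_neg_one_iff _ _).2 (pv_single_infix_of_mem u ')' hm)) hj
      rw [pv_fullSum_zero]
      intro p hp
      exact pv_segVal_no_paren p (fun hmem => hnp (pv_pieces_sub pvM u p hp ')' hmem))
    · have hj0 : 0 ≤ PySem.Chars.find u [')'] := by
        have := PySem.Chars.neg_one_le_find u [')']
        omega
      obtain ⟨hjv, hjmin⟩ := pv_find_single_spec u ')' hj
      rw [pvBodyVal, if_neg hj]
      by_cases hm : PySem.Chars.find u pvM = -1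
      · rw [pv_pieces_no_occ pvM u (by simp [pvM]) hm]
        have htl : pvTailLoop u = 0 := by
          rw [pvTailLoop, dif_pos hm]
        rw [htl]
        simp only [pvFullSum, List.map_cons, List.map_nil, List.sum_cons, List.sum_nil]
        rw [pv_segVal_eq u, if_neg hj]
      · have hm0 : 0 ≤ PySem.Chars.find u pvM := by
          have := PySem.Chars.neg_one_le_find u pvM
          omega
        have hdec := pv_decomp u hm
        have hmv : u[(PySem.Chars.find u pvM).toNat]? = some 'm' := by
          rw [← List.head?_drop, hdec]
          rfl
        have hplen : (PySem.Chars.find u pvM).toNat < u.length := by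
          by_contra hh
          rw [List.getElem?_eq_none (by omega)] at hmv
          simp at hmv
        have hlen4 : (PySem.Chars.find u pvM).toNat + 4 ≤ u.length := by
          have := congrArg List.length hdec
          simp only [List.length_drop, List.length_cons] at this
          omega
        rw [pv_pieces_occ pvM u (by simp [pvM]) hm]
        rw [show pvM.length = 4 from rfl]
        have hrec : pvTailLoop u =
            pvFullSum (pvPieces pvM (u.drop ((PySem.Chars.find u pvM).toNat + 4))) := by
          rw [pv_tailLoop_eq_body u hm]
          exact ih _ (by simp only [List.length_drop]; omega)
        rw [hrec]
        simp only [pvFullSum, List.map_cons, List.sum_cons]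
        have hkey : pvParseB (u.take (PySem.Chars.find u [')']).toNat) =
            pvSegVal (u.take (PySem.Chars.find u pvM).toNat) := by
          have hne : (PySem.Chars.find u pvM).toNat ≠ (PySem.Chars.find u [')']).toNat := by
            intro hh
            rw [hh, hjv] at hmv
            have := Option.some.inj hmv
            exact absurd this (by decide)
          rcases Nat.lt_or_ge (PySem.Chars.find u [')']).toNat (PySem.Chars.find u pvM).toNat
            with hlt | hge
          · -- the first ')' lies inside the first segment: identical contents
            have hft : PySem.Chars.find (u.take (PySem.Chars.find u pvM).toNat) [')']
                = (PySem.Chars.find u [')']).toNat := by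
              apply pv_find_single_eq
              · rw [List.getElem?_take_of_lt hlt]
                exact hjv
              · intro i hi
                rw [List.getElem?_take_of_lt (by omega)]
                exact hjmin i hi
            rw [pv_segVal_eq, hft]
            rw [if_neg (by omega)]
            rw [Int.toNat_natCast, List.take_take, Nat.min_eq_left (by omega)]
          · -- the ')' lies beyond the first "mul(": both sides reject, value 0
            have hlt' : (PySem.Chars.find u pvM).toNat < (PySem.Chars.find u [')']).toNat := by
              omega
            have hz1 : pvSegVal (u.take (PySem.Chars.find u pvM).toNat) = 0 := by
              apply pv_segVal_no_paren
              intro hmem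
              obtain ⟨i, hi, hiv⟩ := List.mem_iff_getElem.1 hmem
              have hilen : i < (PySem.Chars.find u pvM).toNat := by
                have := hi
                simp only [List.length_take] at this
                omega
              apply hjmin i (by omega)
              rw [← List.getElem?_take_of_lt (l := u) (j := (PySem.Chars.find u pvM).toNat) hilen]
              rw [List.getElem?_eq_getElem hi, hiv]
            have hz2 : pvParseB (u.take (PySem.Chars.find u [')']).toNat) = 0 := by
              apply pv_parseB_zero _ 'm'
              · have : (u.take (PySem.Chars.find u [')']).toNat)[(PySem.Chars.find u pvM).toNat]?
                    = some 'm' := by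
                  rw [List.getElem?_take_of_lt hlt']
                  exact hmv
                rcases List.getElem?_eq_some_iff.1 this with ⟨hh, hv⟩
                exact List.mem_iff_getElem.2 ⟨_, hh, hv⟩
              · decide
              · decide
            rw [hz1, hz2]
        rw [hkey]

-- ---------- reduction of the literal port A to pvTailLoop ----------
lemma pv_find_cons_neg (c : Char) (l sub : List Char) (h : sub.isPrefixOf (c :: l) = false) :
    PySem.Chars.find (c :: l) sub =
      if PySem.Chars.find l sub = -1 then -1 else PySem.Chars.find l sub + 1 := by
  rw [pv_find_cons]
  simp [h]

lemma pv_find4 (u : List Char) :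
    PySem.Chars.find ('m' :: 'u' :: 'l' :: '(' :: u) [')'] =
      if PySem.Chars.find u [')'] = -1 then -1 else PySem.Chars.find u [')'] + 4 := by
  have hneg := PySem.Chars.neg_one_le_find u [')']
  rw [pv_find_cons_neg _ _ _ rfl, pv_find_cons_neg _ _ _ rfl, pv_find_cons_neg _ _ _ rfl,
    pv_find_cons_neg _ _ _ rfl]
  by_cases hj : PySem.Chars.find u [')'] = -1
  · simp [hj]
  · rw [if_neg hj, if_neg (by omega), if_neg (by omega), if_neg (by omega), if_neg hj]
    omega

lemma pv_find3M (u : List Char) :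
    PySem.Chars.find ('u' :: 'l' :: '(' :: u) pvM =
      if PySem.Chars.find u pvM = -1 then -1 else PySem.Chars.find u pvM + 3 := by
  have hneg := PySem.Chars.neg_one_le_find u pvM
  rw [pv_find_cons_neg _ _ _ rfl, pv_find_cons_neg _ _ _ rfl, pv_find_cons_neg _ _ _ rfl]
  by_cases hj : PySem.Chars.find u pvM = -1
  · simp [hj]
  · rw [if_neg hj, if_neg (by omega), if_neg (by omega), if_neg hj]
    omega

lemma pv_shift3 (u : List Char) :
    pvTailLoop ('u' :: 'l' :: '(' :: u) = pvTailLoop u := by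
  rw [pvTailLoop]
  conv_rhs => rw [pvTailLoop]
  by_cases hm : PySem.Chars.find u pvM = -1
  · rw [dif_pos (by rw [pv_find3M]; simp [hm]), dif_pos hm]
  · have h0 : 0 ≤ PySem.Chars.find u pvM := by
      have := PySem.Chars.neg_one_le_find u pvM
      omega
    rw [dif_neg (by rw [pv_find3M]; simp [hm]; omega), dif_neg hm]
    have h3 : PySem.Chars.find ('u' :: 'l' :: '(' :: u) pvM = PySem.Chars.find u pvM + 3 := by
      rw [pv_find3M, if_neg hm]
    rw [h3]
    have ht : (PySem.Chars.find u pvM + 3).toNat + 4 = ((PySem.Chars.find u pvM).toNat + 4) + 3 := by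
      omega
    rw [ht, List.drop_succ_cons, Nat.add_succ, List.drop_succ_cons, Nat.add_succ,
      List.drop_succ_cons]

lemma pv_reduceA (s : List Char) :
    ∀ (fuel k : Nat) (acc : Int), k ≤ s.length → s.length + 1 - k ≤ fuel →
      pvLoopA s fuel ((k : Int) - 1) acc = acc + pvTailLoop (s.drop k) := by
  intro fuel
  induction fuel with
  | zero => intro k acc hk hf; omega
  | succ fuel ih =>
    intro k acc hk hf
    rw [pvLoopA]
    simp only []
    rw [show ((k : Int) - 1) + 1 = (k : Int) from by ring,
      show (['m','u','l','('] : List Char) = pvM from rfl,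
      PySem.Chars.findFrom_natCast s pvM k hk]
    by_cases h1 : PySem.Chars.find (s.drop k) pvM = -1
    · rw [if_pos h1, if_pos (Eq.refl (-1 : Int)), pvTailLoop, dif_pos h1]
      ring
    · have hq0 : 0 ≤ PySem.Chars.find (s.drop k) pvM := by
        have := PySem.Chars.neg_one_le_find (s.drop k) pvM
        omega
      set q : Int := PySem.Chars.find (s.drop k) pvM with hqdef
      rw [if_neg h1, if_neg (by omega)]
      have hdec := pv_decomp (s.drop k) h1
      rw [← hqdef] at hdec
      have hdd : s.drop (k + q.toNat) = (s.drop k).drop q.toNat := by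
        rw [List.drop_drop]
      have hlen4 : k + q.toNat + 4 ≤ s.length := by
        have := congrArg List.length hdec
        simp only [List.length_drop, List.length_cons] at this
        omega
      have hu : s.drop (k + q.toNat + 4) = (s.drop k).drop (q.toNat + 4) := by
        rw [List.drop_drop, show k + (q.toNat + 4) = k + q.toNat + 4 from by omega]
      have hp : ((k : Int) + q) = ((k + q.toNat : Nat) : Int) := by push_cast; omega
      rw [hp, PySem.Chars.findFrom_natCast s [')'] (k + q.toNat) (by omega)]
      rw [hdd, hdec, pv_find4]
      by_cases h2 : PySem.Chars.find ((s.drop k).drop (q.toNat + 4)) [')'] = -1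
      · rw [if_pos h2, pvTailLoop, dif_neg h1, ← hqdef]
        simp only [if_pos h2]
        split_ifs <;> omega
      · have hj0 : 0 ≤ PySem.Chars.find ((s.drop k).drop (q.toNat + 4)) [')'] := by
          have := PySem.Chars.neg_one_le_find ((s.drop k).drop (q.toNat + 4)) [')']
          omega
        set j : Int := PySem.Chars.find ((s.drop k).drop (q.toNat + 4)) [')'] with hjdef
        rw [if_neg h2]
        rw [if_neg (show ¬((j : Int) + 4 = -1) from by omega)]
        rw [if_neg (show ¬(((k + q.toNat : Nat) : Int) + (j + 4) = -1) from by omega)]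
        have hcont : PySem.List.slice s (some (((k + q.toNat : Nat) : Int) + 4))
            (some (((k + q.toNat : Nat) : Int) + (j + 4)))
            = ((s.drop k).drop (q.toNat + 4)).take j.toNat := by
          rw [show (((k + q.toNat : Nat) : Int) + 4) = ((k + q.toNat + 4 : Nat) : Int) from by
              push_cast; ring,
            show (((k + q.toNat : Nat) : Int) + (j + 4)) = ((k + q.toNat + 4 : Nat) : Int)
              + ((j.toNat : Nat) : Int) from by push_cast; omega,
            PySem.List.slice_natCast_add, hu]
        rw [hcont]
        have hshift : s.drop (k + q.toNat + 1) = 'u' :: 'l' :: '(' :: (s.drop k).drop (q.toNat + 4) := by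
          have h5 : s.drop (k + q.toNat + 1) = (s.drop (k + q.toNat)).drop 1 := by
            rw [List.drop_drop]
          rw [h5, hdd, hdec]
          rfl
        have hrec : ∀ acc' : Int, pvLoopA s fuel ((k + q.toNat : Nat) : Int) acc'
            = acc' + pvTailLoop ((s.drop k).drop (q.toNat + 4)) := by
          intro acc'
          rw [show (((k + q.toNat : Nat)) : Int) = ((k + q.toNat + 1 : Nat) : Int) - 1 from by
              push_cast; ring,
            ih (k + q.toNat + 1) acc' (by omega) (by omega), hshift, pv_shift3]
        have hrhs : pvTailLoop (s.drop k)
            = pvParseA (((s.drop k).drop (q.toNat + 4)).take j.toNat)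
              + pvTailLoop ((s.drop k).drop (q.toNat + 4)) := by
          rw [pvTailLoop, dif_neg h1, ← hqdef]
          simp only [← hjdef, if_neg h2]
        rw [hrhs]
        by_cases hsp : 0 < PySem.Chars.find (((s.drop k).drop (q.toNat + 4)).take j.toNat) [' ']
        · rw [if_pos hsp, hrec acc, pvParseA, if_pos hsp]
          ring
        · rw [if_neg hsp]
          by_cases hlen2 : (PySem.Chars.splitOn (((s.drop k).drop (q.toNat + 4)).take j.toNat)
              [',']).length ≠ 2
          · rw [if_pos hlen2, hrec acc, pvParseA, if_neg hsp]
            simp only [if_pos hlen2]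
            ring
          · rw [if_neg hlen2]
            by_cases hdig : (!PySem.Chars.strIsdigit
                  ((PySem.Chars.splitOn (((s.drop k).drop (q.toNat + 4)).take j.toNat)
                    [',']).getD 0 [])
                || !PySem.Chars.strIsdigit
                  ((PySem.Chars.splitOn (((s.drop k).drop (q.toNat + 4)).take j.toNat)
                    [',']).getD 1 [])) = true
            · rw [if_pos hdig, hrec acc, pvParseA, if_neg hsp]
              simp only [if_neg hlen2, if_pos hdig]
              ring
            · rw [if_neg hdig, hrec _, pvParseA, if_neg hsp]
              simp only [if_neg hlen2, if_neg hdig]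
              ring

lemma pv_foldl_sum (l : List (List Char)) (a : Int) :
    l.foldl (fun acc seg => acc + pvSegVal seg) a = a + pvFullSum l := by
  induction l generalizing a with
  | nil => simp [pvFullSum]
  | cons h t ih =>
    rw [List.foldl_cons, ih]
    simp only [pvFullSum, List.map_cons, List.sum_cons]
    ring

lemma pv_tailLoop_eq_tailSum (s : List Char) :
    pvTailLoop s = pvFullSum ((pvPieces pvM s).drop 1) := by
  by_cases hm : PySem.Chars.find s pvM = -1
  · rw [pvTailLoop, dif_pos hm, pv_pieces_no_occ pvM s (by simp [pvM]) hm]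
    simp [pvFullSum]
  · rw [pv_pieces_occ pvM s (by simp [pvM]) hm, show pvM.length = 4 from rfl,
      List.drop_succ_cons, List.drop_zero, pv_tailLoop_eq_body s hm]
    exact pv_main _ _ le_rfl

-- ===== VERDICT (by name: the statement is the Claim_ definition above) =====
theorem get_result_of_multiplications_spec : Claim_equal_get_result_of_multiplications := by
  intro c _
  unfold Spec_get_result_of_multiplications get_result_of_multiplications
    get_result_of_multiplications_alt
  have h1 := pv_reduceA c.toList (c.toList.length + 1) 0 0 (by omega) (by omega)
  rw [show (((0:Nat) : Int)) - 1 = (-1 : Int) from by norm_num, List.drop_zero, zero_add] at h1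
  rw [h1, pv_tailLoop_eq_tailSum,
    show (['m','u','l','('] : List Char) = pvM from rfl,
    pv_splitOn_eq_pieces _ pvM (by simp [pvM]),
    PySem.List.slice_from_one, pv_foldl_sum, ← List.drop_one]
  norm_num
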